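-- pv_equiv track=rewrite | github.com/BippleDops/Veridia | vault_backup_20250813_073007/scripts/standardize_file_naming.py | truncate_smart
-- ===== SOURCE A (Python) =====
-- def truncate_smart(text, max_length):
--     """Intelligently truncate filename while preserving meaning"""
--     if len(text) <= max_length:
--         return text
--
--     # Try to truncate at word boundaries
--     words = text.split()
--     result = []
--     length = 0
--
--     for word in words:
--         if length + len(word) + 1 > max_length:
--             break
--         result.append(word)
--         length += len(word) + 1
--
--     # If we got at least 2 words, use that
--     if len(result) >= 2:
--         return ' '.join(result)
--
--     # Otherwise, truncate at character boundary
--     return text[:max_length].rstrip()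
-- ===== SOURCE B (Python) =====
-- def _bisect_right(a, x):
--     # hand-written bisect_right (rightmost insertion point in sorted list a)
--     lo, hi = 0, len(a)
--     while lo < hi:
--         mid = (lo + hi) // 2
--         if x < a[mid]:
--             hi = mid
--         else:
--             lo = mid + 1
--     return lo
--
--
-- def truncate_smart(text, max_length):
--     """Intelligently truncate filename while preserving meaning"""
--     if len(text) <= max_length:
--         return text
--
--     words = text.split()
--     # prefix[i] = cumulative length of the first i words, counting len(word)+1 each
--     prefix = [0]
--     for w in words:
--         prefix.append(prefix[-1] + len(w) + 1)
--
--     # number of words that fit = largest m with prefix[m] <= max_length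
--     count = _bisect_right(prefix, max_length) - 1
--
--     if count >= 2:
--         return ' '.join(words[:count])
--
--     return text[:max_length].rstrip()
-- ===== Notes on version B (the rewrite author's own statement) =====
-- stated objective: alternative
-- what changed: Replaces the greedy break-loop over words by a prefix-sum table plus a hand-written binary search (bisect_right) that finds how many words fit in O(log n) after the O(n) table build.
import Mathlib
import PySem

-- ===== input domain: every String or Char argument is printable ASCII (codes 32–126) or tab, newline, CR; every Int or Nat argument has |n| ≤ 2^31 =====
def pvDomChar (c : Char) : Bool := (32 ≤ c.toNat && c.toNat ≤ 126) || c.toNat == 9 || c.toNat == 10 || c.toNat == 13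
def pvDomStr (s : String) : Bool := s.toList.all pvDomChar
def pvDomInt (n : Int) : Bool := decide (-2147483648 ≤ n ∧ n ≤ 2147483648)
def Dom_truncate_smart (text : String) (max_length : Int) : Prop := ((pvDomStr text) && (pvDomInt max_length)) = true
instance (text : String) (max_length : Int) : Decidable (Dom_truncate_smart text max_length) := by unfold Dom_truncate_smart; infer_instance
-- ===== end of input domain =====

-- B replaces A's greedy break-loop by a prefix-sum table and a hand-written binary search
-- (bisect_right) deciding how many words fit; same return value everywhere (objective: alternative).

-- ===== PORT A =====
-- the 'for word in words: if …: break; result.append(word); length += …' loop of A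
def goA (m : Int) : List String → Int → List String
  | [], _ => []
  | w :: ws, length =>
    if m < length + PySem.Str.len w + 1 then []
    else w :: goA m ws (length + PySem.Str.len w + 1)

def truncate_smart (text : String) (max_length : Int) : String :=
  if PySem.Str.len text ≤ max_length then text
  else
    let words := PySem.Str.split₀ text
    let result := goA max_length words 0
    if 2 ≤ result.length then PySem.Str.join " " result
    else PySem.Str.rstrip (PySem.Str.slice text none (some max_length))

-- ===== PORT B =====
-- the 'prefix = [0]; for w in words: prefix.append(prefix[-1] + len(w) + 1)' loop of Source B
def buildPrefix : List String → Int → List Int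
  | [], s => [s]
  | w :: t, s => s :: buildPrefix t (s + PySem.Str.len w + 1)

-- the 'while lo < hi' loop of Source B's _bisect_right
def bisectAux (a : List Int) (x : Int) (lo hi : Nat) : Nat :=
  if h : lo < hi then
    let mid := (lo + hi) / 2
    if x < a.getD mid 0 then bisectAux a x lo mid else bisectAux a x (mid + 1) hi
  else lo
termination_by hi - lo
decreasing_by · omega
              · omega

def bisectRight (a : List Int) (x : Int) : Nat := bisectAux a x 0 a.length

def truncate_smart_alt (text : String) (max_length : Int) : String :=
  if PySem.Str.len text ≤ max_length then text
  else
    let words := PySem.Str.split₀ text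
    let pre := buildPrefix words 0
    let count : Int := (bisectRight pre max_length : Int) - 1
    if 2 ≤ count then PySem.Str.join " " (PySem.List.slice words none (some count))
    else PySem.Str.rstrip (PySem.Str.slice text none (some max_length))

-- ===== PRECONDITION & SPEC =====
def Spec_truncate_smart (text : String) (max_length : Int) (out : String) : Prop := out = truncate_smart_alt text max_length
instance (text : String) (max_length : Int) (out : String) : Decidable (Spec_truncate_smart text max_length out) := by unfold Spec_truncate_smart; infer_instance

-- ===== CLAIM (what is proved, stated in full; the proofs are below) =====
def Claim_equal_truncate_smart : Prop := ∀ (text : String) (max_length : Int), Dom_truncate_smart text max_length → Spec_truncate_smart text max_length (truncate_smart text max_length)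

-- ===== LEMMAS AND PROOFS =====

-- the number of prefix-table entries ≤ m, expressed through A's loop
def cntK (m : Int) (ws : List String) (s : Int) : Nat :=
  if s ≤ m then (goA m ws s).length + 1 else 0

theorem str_len_nonneg (w : String) : 0 ≤ PySem.Str.len w := by
  rw [PySem.Str.len_eq]; exact Int.natCast_nonneg _

theorem goA_len_le (m : Int) (ws : List String) (s : Int) :
    (goA m ws s).length ≤ ws.length := by
  induction ws generalizing s with
  | nil => simp [goA]
  | cons w t ih =>
    simp only [goA]
    split
    · simp
    · simpa using Nat.succ_le_succ (ih _)

theorem goA_eq_take (m : Int) (ws : List String) (s : Int) :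
    goA m ws s = ws.take (goA m ws s).length := by
  induction ws generalizing s with
  | nil => simp [goA]
  | cons w t ih =>
    simp only [goA]
    split
    · simp
    · simp only [List.length_cons, List.take_succ_cons, List.cons.injEq, true_and]
      exact ih _

theorem cntK_cons (m : Int) (w : String) (t : List String) (s : Int) :
    cntK m (w :: t) s =
      if s ≤ m then cntK m t (s + PySem.Str.len w + 1) + 1 else 0 := by
  unfold cntK
  have hw := str_len_nonneg w
  by_cases hs : s ≤ m
  · simp only [goA]
    by_cases hc : m < s + PySem.Str.len w + 1
    · rw [if_pos hs, if_pos hc, if_pos hs, if_neg (by omega)]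
      simp
    · rw [if_pos hs, if_neg hc, if_pos hs, if_pos (by omega)]
      simp
  · rw [if_neg hs, if_neg hs]

theorem cntK_le (m : Int) (ws : List String) (s : Int) :
    cntK m ws s ≤ ws.length + 1 := by
  unfold cntK
  split
  · have := goA_len_le m ws s; omega
  · omega

theorem length_buildPrefix (ws : List String) (s : Int) :
    (buildPrefix ws s).length = ws.length + 1 := by
  induction ws generalizing s with
  | nil => simp [buildPrefix]
  | cons w t ih => simp [buildPrefix, ih]

theorem buildPrefix_iff (m : Int) (ws : List String) (s : Int) (i : Nat)
    (hi : i < (buildPrefix ws s).length) :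
    ((buildPrefix ws s).getD i 0 ≤ m ↔ i < cntK m ws s) := by
  induction ws generalizing s i with
  | nil =>
    simp only [buildPrefix, List.length_singleton] at hi ⊢
    interval_cases i
    unfold cntK
    split <;> rename_i h <;> simp [goA, h]
  | cons w t ih =>
    simp only [buildPrefix, List.length_cons] at hi ⊢
    have hw := str_len_nonneg w
    cases i with
    | zero =>
      rw [cntK_cons]
      split <;> rename_i h <;> simp [h]
    | succ j =>
      have hj : j < (buildPrefix t (s + PySem.Str.len w + 1)).length := by
        simpa using Nat.lt_of_succ_lt_succ hi
      have := ih (s + PySem.Str.len w + 1) j hj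
      simp only [List.getD_cons_succ]
      rw [this, cntK_cons]
      by_cases hs : s ≤ m
      · rw [if_pos hs]; omega
      · have hz : cntK m t (s + PySem.Str.len w + 1) = 0 := by
          rw [cntK, if_neg (by omega)]
        rw [if_neg hs, hz]; omega

theorem bisectAux_eq (a : List Int) (x : Int) (K : Nat)
    (H : ∀ i, i < a.length → (a.getD i 0 ≤ x ↔ i < K)) :
    ∀ n lo hi, hi - lo ≤ n → lo ≤ K → K ≤ hi → hi ≤ a.length →
      bisectAux a x lo hi = K := by
  intro n
  induction n with
  | zero =>
    intro lo hi h1 h2 h3 h4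
    rw [bisectAux]
    have : ¬ lo < hi := by omega
    simp [this]; omega
  | succ n ih =>
    intro lo hi h1 h2 h3 h4
    rw [bisectAux]
    by_cases hlt : lo < hi
    · simp only [hlt, dif_pos]
      set mid := (lo + hi) / 2 with hmid
      have hml : lo ≤ mid := by omega
      have hmh : mid < hi := by omega
      have hmem : mid < a.length := by omega
      have hK := H mid hmem
      by_cases hx : x < a.getD mid 0
      · have : ¬ mid < K := fun h => by have := hK.mpr h; omega
        simp only [hx, if_true]
        exact ih lo mid (by omega) h2 (by omega) (by omega)
      · have hmk : mid < K := hK.mp (by omega)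
        simp only [hx, if_false]
        exact ih (mid + 1) hi (by omega) (by omega) h3 h4
    · simp [hlt]; omega

theorem bisectRight_eq_cntK (m : Int) (ws : List String) :
    bisectRight (buildPrefix ws 0) m = cntK m ws 0 := by
  unfold bisectRight
  apply bisectAux_eq (buildPrefix ws 0) m (cntK m ws 0)
    (fun i hi => buildPrefix_iff m ws 0 i hi)
    (buildPrefix ws 0).length 0 (buildPrefix ws 0).length (by omega) (by omega)
  · rw [length_buildPrefix]; exact cntK_le m ws 0
  · omega

theorem goA_of_neg (m : Int) (ws : List String) (hm : m < 0) :
    goA m ws 0 = [] := by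
  cases ws with
  | nil => rfl
  | cons w t =>
    have hw := str_len_nonneg w
    simp only [goA]
    have hlt : m < 0 + PySem.Str.len w + 1 := by omega
    rw [if_pos hlt]

-- ===== VERDICT (by name: the statement is the Claim_ definition above) =====
theorem truncate_smart_spec : Claim_equal_truncate_smart := by
  intro text m _
  unfold Spec_truncate_smart truncate_smart truncate_smart_alt
  by_cases h0 : PySem.Str.len text ≤ m
  · rw [if_pos h0, if_pos h0]
  · simp only [h0, if_false]
    set ws := PySem.Str.split₀ text with hws
    rw [bisectRight_eq_cntK]
    by_cases hm : 0 ≤ m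
    · have hc : cntK m ws 0 = (goA m ws 0).length + 1 := by simp [cntK, hm]
      rw [hc]
      set L := (goA m ws 0).length with hL
      have hcount : ((L + 1 : Nat) : Int) - 1 = (L : Int) := by push_cast; ring
      rw [hcount]
      by_cases h2 : 2 ≤ L
      · have h2' : (2 : Int) ≤ (L : Int) := by exact_mod_cast h2
        rw [if_pos h2, if_pos h2']
        rw [PySem.List.slice_to ws (by omega), Int.toNat_natCast, hL,
          ← goA_eq_take m ws 0]
      · have h2' : ¬ (2 : Int) ≤ (L : Int) := by exact_mod_cast h2
        rw [if_neg h2, if_neg h2']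
    · have hc : cntK m ws 0 = 0 := by simp [cntK]; omega
      have hg : (goA m ws 0).length = 0 := by
        rw [goA_of_neg m ws (by omega)]; rfl
      rw [hc, hg]
      norm_num
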